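-- pv_equiv track=rewrite | github.com/dhetong/Log-Abstraction | demo/parsing/MatchLine.py | doubleTokenCompare
-- ===== SOURCE A (Python) =====
-- def doubleTokenCompare(logTokens, tokenDictionary, threshold):
--     logEvent = '';
--     for index in range(len(logTokens)):
--         if index == len(logTokens) - 1:
--             break;
--         doubleTmp = logTokens[index] + ',' + logTokens[index+1];
--         if doubleTmp in tokenDictionary and tokenDictionary[doubleTmp] >= threshold:
--             token = logTokens[index];
--         else:
--             if index > 0:
--                 doubleTmp = logTokens[index - 1] + ',' + logTokens[index];
--                 if doubleTmp in tokenDictionary and tokenDictionary[doubleTmp] >= threshold: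
--                     token = logTokens[index];
--                 else:
--                     token = '#';
--             else:
--                 token = '#';
--         logEvent = logEvent + token + ' ';
--     return logEvent;
-- ===== SOURCE B (Python) =====
-- def doubleTokenCompare(logTokens, tokenDictionary, threshold):
--     n = len(logTokens)
--     matched = set()
--     for j in range(n - 1):
--         big = logTokens[j] + ',' + logTokens[j + 1]
--         if big in tokenDictionary and tokenDictionary[big] >= threshold:
--             matched.add(j)
--             matched.add(j + 1)
--     out = ''
--     for i in range(n - 1):
--         out += (logTokens[i] if i in matched else '#') + ' '
--     return out
-- ===== Notes on version B (the rewrite author's own statement) =====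
-- stated objective: alternative
-- what changed: Replaces A's single pass with per-index forward/backward nested bigram conditionals by a mark-then-emit scheme: one pass marks both endpoints of every frequent bigram in a set, a second pass emits each token or '#' by set membership; B also accumulates with out += instead of A's logEvent = logEvent + token + ' ', avoiding quadratic string rebuilding.
import Mathlib
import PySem

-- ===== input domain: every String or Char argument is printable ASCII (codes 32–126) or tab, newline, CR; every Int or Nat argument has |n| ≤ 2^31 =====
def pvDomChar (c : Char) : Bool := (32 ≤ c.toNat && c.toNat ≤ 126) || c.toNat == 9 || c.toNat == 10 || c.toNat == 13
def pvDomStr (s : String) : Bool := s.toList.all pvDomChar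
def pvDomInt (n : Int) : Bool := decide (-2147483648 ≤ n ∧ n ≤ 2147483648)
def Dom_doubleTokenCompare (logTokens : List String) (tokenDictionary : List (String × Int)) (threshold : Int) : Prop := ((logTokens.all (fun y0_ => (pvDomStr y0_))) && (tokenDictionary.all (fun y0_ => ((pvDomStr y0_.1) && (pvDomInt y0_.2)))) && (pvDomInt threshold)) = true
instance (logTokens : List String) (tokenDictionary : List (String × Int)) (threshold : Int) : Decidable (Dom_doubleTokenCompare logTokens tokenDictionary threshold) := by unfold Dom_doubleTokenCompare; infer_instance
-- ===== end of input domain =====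

-- B replaces A's nested forward/backward per-index conditionals by a mark-then-emit pass over a set; alternative decomposition, same cost.

-- ===== PORT A =====
-- shared helper: 'big in tokenDictionary and tokenDictionary[big] >= threshold' (the lookup is guarded, so no KeyError)
def pvBigHit (tokenDictionary : List (String × Int)) (threshold : Int) (s : String) : Bool :=
  match (PySem.Dict.mk tokenDictionary).get? s with
  | some v => decide (threshold ≤ v)
  | none => false

-- the token A selects at a given index (the nested if/else ladder of A's loop body)
def pvTokA (logTokens : List String) (tokenDictionary : List (String × Int)) (threshold : Int) (idx : Int) : String :=
  if pvBigHit tokenDictionary threshold (PySem.List.pyGetD logTokens idx "" ++ "," ++ PySem.List.pyGetD logTokens (idx + 1) "") then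
    PySem.List.pyGetD logTokens idx ""
  else if 0 < idx then
    if pvBigHit tokenDictionary threshold (PySem.List.pyGetD logTokens (idx - 1) "" ++ "," ++ PySem.List.pyGetD logTokens idx "") then
      PySem.List.pyGetD logTokens idx ""
    else "#"
  else "#"

-- A's loop: for index in range(len(logTokens)), with 'break' at the last index
def pvLoopA (logTokens : List String) (tokenDictionary : List (String × Int)) (threshold : Int) (n : Int) : List Int → String → String
  | [], acc => acc
  | idx :: rest, acc =>
    if idx = n - 1 then acc
    else pvLoopA logTokens tokenDictionary threshold n rest (acc ++ pvTokA logTokens tokenDictionary threshold idx ++ " ")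

def doubleTokenCompare (logTokens : List String) (tokenDictionary : List (String × Int)) (threshold : Int) : String :=
  pvLoopA logTokens tokenDictionary threshold (logTokens.length : Int)
    (PySem.List.pyRange 0 (logTokens.length : Int) 1) ""

-- ===== PORT B =====
def doubleTokenCompare_alt (logTokens : List String) (tokenDictionary : List (String × Int)) (threshold : Int) : String :=
  let n : Int := (logTokens.length : Int)
  let matched : PySem.Set Int :=
    (PySem.List.pyRange 0 (n - 1) 1).foldl
      (fun s j =>
        if pvBigHit tokenDictionary threshold (PySem.List.pyGetD logTokens j "" ++ "," ++ PySem.List.pyGetD logTokens (j + 1) "") then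
          PySem.Set.add (PySem.Set.add s j) (j + 1)
        else s)
      PySem.Set.empty
  (PySem.List.pyRange 0 (n - 1) 1).foldl
    (fun acc i => acc ++ (if PySem.Set.contains matched i then PySem.List.pyGetD logTokens i "" else "#") ++ " ") ""

-- ===== PRECONDITION & SPEC =====
def Spec_doubleTokenCompare (logTokens : List String) (tokenDictionary : List (String × Int)) (threshold : Int) (out : String) : Prop := out = doubleTokenCompare_alt logTokens tokenDictionary threshold
instance (logTokens : List String) (tokenDictionary : List (String × Int)) (threshold : Int) (out : String) : Decidable (Spec_doubleTokenCompare logTokens tokenDictionary threshold out) := by unfold Spec_doubleTokenCompare; infer_instance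

-- ===== CLAIM (what is proved, stated in full; the proofs are below) =====
def Claim_equal_doubleTokenCompare : Prop := ∀ (logTokens : List String) (tokenDictionary : List (String × Int)) (threshold : Int), Dom_doubleTokenCompare logTokens tokenDictionary threshold → Spec_doubleTokenCompare logTokens tokenDictionary threshold (doubleTokenCompare logTokens tokenDictionary threshold)

-- ===== LEMMAS AND PROOFS =====

-- A's break-loop over a prefix of indices all below n-1, ending at the break index n-1, is a plain fold over the prefix
theorem pvLoopA_break_last (lt : List String) (d : List (String × Int)) (th : Int) (n : Int)
    (L : List Int) (acc : String) (h : ∀ x ∈ L, x ≠ n - 1) :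
    pvLoopA lt d th n (L ++ [n - 1]) acc = L.foldl (fun acc idx => acc ++ pvTokA lt d th idx ++ " ") acc := by
  induction L generalizing acc with
  | nil => simp [pvLoopA]
  | cons x rest ih =>
    have hx : x ≠ n - 1 := h x (by simp)
    simp [pvLoopA, hx, ih _ (fun y hy => h y (by simp [hy]))]

-- A equals the fold over range(n-1)
theorem doubleTokenCompare_eq_fold (lt : List String) (d : List (String × Int)) (th : Int) :
    doubleTokenCompare lt d th =
      (PySem.List.pyRange 0 ((lt.length : Int) - 1) 1).foldl
        (fun acc idx => acc ++ pvTokA lt d th idx ++ " ") "" := by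
  unfold doubleTokenCompare
  rcases Nat.eq_zero_or_pos lt.length with h0 | hpos
  · simp [h0, PySem.List.pyRange, pvLoopA]
  · have hn : (0:Int) ≤ (lt.length : Int) - 1 := by omega
    have hsplit : PySem.List.pyRange 0 (lt.length : Int) 1 =
        PySem.List.pyRange 0 ((lt.length : Int) - 1) 1 ++ [(lt.length : Int) - 1] := by
      have := PySem.List.pyRange_one_succ_right (a := 0) (b := (lt.length : Int) - 1) hn
      simpa using this
    rw [hsplit]
    exact pvLoopA_break_last lt d th _ _ "" (by
      intro x hx
      have := PySem.List.mem_pyRange_one.mp hx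
      omega)

-- membership in the mark fold
theorem mem_markFold (h : Int → Bool) (L : List Int) (s : PySem.Set Int) (y : Int) :
    (y ∈ L.foldl (fun s j => if h j then PySem.Set.add (PySem.Set.add s j) (j + 1) else s) s) ↔
      y ∈ s ∨ ∃ j ∈ L, h j ∧ (y = j ∨ y = j + 1) := by
  induction L generalizing s with
  | nil => simp
  | cons x rest ih =>
    by_cases hx : h x
    · simp [hx, ih, PySem.Set.mem_add, or_assoc]
    · simp [hx, ih]

-- proof-side abbreviations: the bigram test at index j, and B's mark set
def pvHit (lt : List String) (d : List (String × Int)) (th : Int) (j : Int) : Bool :=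
  pvBigHit d th (PySem.List.pyGetD lt j "" ++ "," ++ PySem.List.pyGetD lt (j + 1) "")

def pvMarked (lt : List String) (d : List (String × Int)) (th : Int) : PySem.Set Int :=
  (PySem.List.pyRange 0 ((lt.length : Int) - 1) 1).foldl
    (fun s j => if pvHit lt d th j then PySem.Set.add (PySem.Set.add s j) (j + 1) else s) PySem.Set.empty

theorem alt_eq_fold (lt : List String) (d : List (String × Int)) (th : Int) :
    doubleTokenCompare_alt lt d th =
      (PySem.List.pyRange 0 ((lt.length : Int) - 1) 1).foldl
        (fun acc i => acc ++ (if PySem.Set.contains (pvMarked lt d th) i then PySem.List.pyGetD lt i "" else "#") ++ " ") "" := rfl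

theorem mem_marked (lt : List String) (d : List (String × Int)) (th : Int) (y : Int) :
    y ∈ pvMarked lt d th ↔
      ∃ j, (0 ≤ j ∧ j < (lt.length : Int) - 1) ∧ pvHit lt d th j = true ∧ (y = j ∨ y = j + 1) := by
  unfold pvMarked
  rw [mem_markFold]
  simp [PySem.List.mem_pyRange_one]

theorem tok_eq (lt : List String) (d : List (String × Int)) (th : Int) (i : Int)
    (h0 : 0 ≤ i) (h1 : i < (lt.length : Int) - 1) :
    pvTokA lt d th i =
      (if PySem.Set.contains (pvMarked lt d th) i then PySem.List.pyGetD lt i "" else "#") := by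
  unfold pvTokA
  by_cases hA : pvHit lt d th i = true
  · have hm : i ∈ pvMarked lt d th := (mem_marked lt d th i).mpr ⟨i, ⟨h0, h1⟩, hA, Or.inl rfl⟩
    simp only [pvHit] at hA
    simp [hA, hm]
  · by_cases hp : 0 < i
    · by_cases hB : pvHit lt d th (i - 1) = true
      · have hm : i ∈ pvMarked lt d th :=
          (mem_marked lt d th i).mpr ⟨i - 1, ⟨by omega, by omega⟩, hB, Or.inr (by omega)⟩
        simp only [pvHit] at hA hB
        rw [show i - 1 + 1 = i from by omega] at hB
        simp only [Bool.not_eq_true] at hA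
        simp [hA, hp, hB, hm]
      · have hnm : i ∉ pvMarked lt d th := by
          intro hm
          rcases (mem_marked lt d th i).mp hm with ⟨j, _, hj, hij⟩
          rcases hij with rfl | h
          · exact hA hj
          · have : j = i - 1 := by omega
            subst this; exact hB hj
        simp only [pvHit] at hA hB
        rw [show i - 1 + 1 = i from by omega] at hB
        simp only [Bool.not_eq_true] at hA hB
        simp [hA, hp, hB, hnm]
    · have hi0 : i = 0 := by omega
      subst hi0
      have hnm : (0:Int) ∉ pvMarked lt d th := by
        intro hm
        rcases (mem_marked lt d th 0).mp hm with ⟨j, ⟨hj0, _⟩, hj, hij⟩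
        rcases hij with rfl | h
        · exact hA hj
        · omega
      simp only [pvHit] at hA
      norm_num at hA
      simp [hA, hnm]

-- ===== VERDICT (by name: the statement is the Claim_ definition above) =====
theorem doubleTokenCompare_spec : Claim_equal_doubleTokenCompare := by
  intro lt d th _
  unfold Spec_doubleTokenCompare
  rw [doubleTokenCompare_eq_fold, alt_eq_fold]
  apply PySem.List.foldl_congr_mem
  intro acc i hi
  have h := PySem.List.mem_pyRange_one.mp hi
  rw [tok_eq lt d th i h.1 h.2]
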